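-- pv_equiv track=rewrite | github.com/douymLab/PhyloSOLID | src/scaffold_builder.py | get_all_path_nodes_with_group_filter
-- ===== SOURCE A (Python) =====
-- def get_all_path_nodes_with_group_filter(intersection_nodes, tree_parent_dict, mutation_group, target_group):
--     """
--     获取与交集节点相关的路径节点，但仅限于 mutation_group 中属于 target_group 的 clone 下的路径
--     """
--     all_path_nodes = set()
--     all_path_nodes.add('ROOT')  # 总是包含 ROOT
--
--     for node in intersection_nodes:
--         path = get_path_to_root_scaffold(node, tree_parent_dict)
--         all_path_nodes.update(path)
--
--     # 交集节点之间的路径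
--     intersection_list = list(intersection_nodes)
--     for i in range(len(intersection_list)):
--         for j in range(i + 1, len(intersection_list)):
--             path_between = get_path_between_nodes_scaffold(intersection_list[i], intersection_list[j], tree_parent_dict)
--             all_path_nodes.update(path_between)
--
--     # 只保留属于 target_group 的节点路径
--     all_path_nodes = {node for node in all_path_nodes if valid_node_with_group(node, mutation_group, target_group)}
--
--     return all_path_nodes
--
-- def valid_node_with_group(node, mutation_group, target_group):
--     """
--     判断一个节点是否属于目标 mutation_group 的 group
--     """
--     node_muts = node.split("|")
--     for mut in node_muts:
--         if mut in mutation_group and mutation_group[mut] == target_group: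
--             return True
--     return False
--
-- def get_path_to_root_scaffold(node, tree_parent_dict):
--     """找到从节点到 ROOT 的路径"""
--     path = []
--     current = node
--     while current in tree_parent_dict:
--         path.append(current)
--         current = tree_parent_dict[current]
--         if current == 'ROOT':
--             path.append('ROOT')
--             break
--     return path
--
-- def get_path_between_nodes_scaffold(node1, node2, tree_parent_dict):
--     """找到两个节点之间的路径"""
--     # 找到从 node1 到 ROOT 的路径
--     path1 = get_path_to_root_scaffold(node1, tree_parent_dict)
--     # 找到从 node2 到 ROOT 的路径
--     path2 = get_path_to_root_scaffold(node2, tree_parent_dict)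
--
--     # 反转路径，使其从 ROOT 开始
--     path1_from_root = list(reversed(path1))
--     path2_from_root = list(reversed(path2))
--
--     # 找到最近公共祖先 (LCA)
--     lca = None
--     for i in range(min(len(path1_from_root), len(path2_from_root))):
--         if path1_from_root[i] == path2_from_root[i]:
--             lca = path1_from_root[i]
--         else:
--             break
--
--     if lca is None:
--         return []
--
--     # 构建完整路径: node1 -> LCA -> node2
--     lca_index1 = path1_from_root.index(lca)
--     lca_index2 = path2_from_root.index(lca)
--
--     path_node1_to_lca = path1_from_root[lca_index1:]
--     path_lca_to_node2 = path2_from_root[lca_index2:]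
--
--     # 合并路径，去掉重复的 LCA
--     full_path = path_node1_to_lca + path_lca_to_node2[1:]
--     return full_path
-- ===== SOURCE B (Python) =====
-- def get_all_path_nodes_with_group_filter(intersection_nodes, tree_parent_dict, mutation_group, target_group):
--     # One pass: walk each intersection node up to ROOT once, collecting visited
--     # nodes; any path BETWEEN two intersection nodes consists only of nodes that
--     # already lie on one of the two root paths, so the pairwise loop is dropped.
--     seen = {'ROOT'}
--     for node in intersection_nodes:
--         cur = node
--         while cur in tree_parent_dict:
--             seen.add(cur)
--             cur = tree_parent_dict[cur]
--             if cur == 'ROOT':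
--                 break
--     return {n for n in seen
--             if any(mutation_group.get(m) == target_group for m in n.split('|'))}
-- ===== Notes on version B (the rewrite author's own statement) =====
-- stated objective: faster
-- what changed: Drops A's O(n^2) pairwise path-between loop (with its LCA computation, reversals, index and slices) entirely: every node on a path between two intersection nodes already lies on one of their root paths, so B collects the set in a single walk per intersection node with an inline while loop and no path lists.
import Mathlib
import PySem

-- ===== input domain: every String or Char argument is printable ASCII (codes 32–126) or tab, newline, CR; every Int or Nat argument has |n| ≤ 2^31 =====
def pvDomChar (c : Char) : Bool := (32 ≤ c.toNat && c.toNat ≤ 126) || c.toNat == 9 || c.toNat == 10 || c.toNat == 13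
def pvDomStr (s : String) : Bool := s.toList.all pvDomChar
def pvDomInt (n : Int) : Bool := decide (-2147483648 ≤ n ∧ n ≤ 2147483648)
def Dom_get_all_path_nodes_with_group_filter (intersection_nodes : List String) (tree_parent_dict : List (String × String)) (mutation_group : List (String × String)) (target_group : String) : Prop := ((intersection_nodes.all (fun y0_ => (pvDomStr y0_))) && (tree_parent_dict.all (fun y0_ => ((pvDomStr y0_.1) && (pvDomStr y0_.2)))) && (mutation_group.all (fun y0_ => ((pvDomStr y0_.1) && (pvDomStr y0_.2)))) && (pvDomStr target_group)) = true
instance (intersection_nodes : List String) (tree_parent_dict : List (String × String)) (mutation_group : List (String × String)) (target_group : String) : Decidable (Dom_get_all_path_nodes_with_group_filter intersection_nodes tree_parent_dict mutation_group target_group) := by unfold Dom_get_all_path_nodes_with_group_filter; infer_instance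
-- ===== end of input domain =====

-- B drops A's O(n^2) pairwise path-between loop (every path between two intersection
-- nodes lies on their root paths) and collects the set in one walk per node: faster.
-- Equivalence is about the RETURN value (neither program mutates its arguments).

-- ===== PORT A =====

-- while current in tree_parent_dict: path.append(current); current = d[current]; if current == 'ROOT': path.append('ROOT'); break
-- fueled: |dict| + 1 steps cover every terminating chain (a chain that never revisits a key);
-- on a cyclic parent map Python A never returns, so no return value is claimed there
def pvWalkA (d : PySem.Dict String String) : Nat → String → List String → List String
  | 0, _, path => path
  | fuel+1, current, path =>
    if d.contains current then
      let path := path ++ [current]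
      let nxt := d.getD current ""     -- guarded by contains: exact for Python d[current]
      if nxt == "ROOT" then path ++ ["ROOT"]
      else pvWalkA d fuel nxt path
    else path

def pvGetPathToRoot (node : String) (d : PySem.Dict String String) : List String :=
  pvWalkA d (d.size + 1) node []

-- for i in range(min(len,len)): if p1[i] == p2[i]: lca = p1[i] else: break
def pvLcaLoop (p1 p2 : List String) : Nat → Nat → Option String → Option String
  | 0, _, lca => lca
  | rem+1, i, lca =>
    match p1[i]?, p2[i]? with
    | some a, some b => if a == b then pvLcaLoop p1 p2 rem (i+1) (some a) else lca
    | _, _ => lca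

def pvGetPathBetween (node1 node2 : String) (d : PySem.Dict String String) : List String :=
  let path1 := pvGetPathToRoot node1 d
  let path2 := pvGetPathToRoot node2 d
  let p1r := path1.reverse
  let p2r := path2.reverse
  match pvLcaLoop p1r p2r (min p1r.length p2r.length) 0 none with
  | none => []
  | some lca =>
    let i1 : Nat := (PySem.List.index? p1r lca).getD 0   -- lca ∈ p1r: .index never raises here
    let i2 : Nat := (PySem.List.index? p2r lca).getD 0
    let pathNode1ToLca := PySem.List.slice p1r (some (i1 : Int)) none
    let pathLcaToNode2 := PySem.List.slice p2r (some (i2 : Int)) none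
    pathNode1ToLca ++ PySem.List.slice pathLcaToNode2 (some (1 : Int)) none

-- for mut in node.split('|'): if mut in mutation_group and mutation_group[mut] == target_group: return True
def pvValidLoopA (muts : List String) (mg : PySem.Dict String String) (tg : String) : Bool :=
  match muts with
  | [] => false
  | m :: rest =>
    if mg.contains m && (mg.getD m "" == tg) then true   -- getD guarded by contains: exact
    else pvValidLoopA rest mg tg

def pvValidNodeWithGroup (node : String) (mg : PySem.Dict String String) (tg : String) : Bool :=
  pvValidLoopA ((PySem.Str.split? node "|").getD []) mg tg   -- sep "|" ≠ "": split? is always some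

def get_all_path_nodes_with_group_filter (intersection_nodes : List String) (tree_parent_dict : List (String × String)) (mutation_group : List (String × String)) (target_group : String) : List String :=
  let d := PySem.Dict.mk tree_parent_dict
  let mg := PySem.Dict.mk mutation_group
  let s0 : PySem.Set String := PySem.Set.add PySem.Set.empty "ROOT"
  let s1 := intersection_nodes.foldl (fun s node => PySem.Set.update s (pvGetPathToRoot node d)) s0
  let s2 := (PySem.List.pyRange 0 intersection_nodes.length).foldl (fun s i =>
      (PySem.List.pyRange (i+1) intersection_nodes.length).foldl (fun s j =>
        PySem.Set.update s (pvGetPathBetween (PySem.List.pyGetD intersection_nodes i "")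
          (PySem.List.pyGetD intersection_nodes j "") d)) s) s1
  PySem.Set.ofList (s2.filter (fun node => pvValidNodeWithGroup node mg target_group))

-- ===== PORT B =====

-- while cur in tree_parent_dict: seen.add(cur); cur = d[cur]; if cur == 'ROOT': break
def pvWalkB (d : PySem.Dict String String) : Nat → String → PySem.Set String → PySem.Set String
  | 0, _, s => s
  | fuel+1, cur, s =>
    match d.get? cur with
    | none => s
    | some nxt =>
      let s := PySem.Set.add s cur
      if nxt == "ROOT" then s else pvWalkB d fuel nxt s

def pvValidB (node : String) (mg : PySem.Dict String String) (tg : String) : Bool :=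
  ((PySem.Str.split? node "|").getD []).any (fun m => mg.get? m == some tg)

def get_all_path_nodes_with_group_filter_alt (intersection_nodes : List String) (tree_parent_dict : List (String × String)) (mutation_group : List (String × String)) (target_group : String) : List String :=
  let d := PySem.Dict.mk tree_parent_dict
  let mg := PySem.Dict.mk mutation_group
  let seen := intersection_nodes.foldl (fun s n => pvWalkB d (d.size + 1) n s) (PySem.Set.ofList ["ROOT"])
  PySem.Set.ofList (seen.filter (fun n => pvValidB n mg target_group))

-- ===== PRECONDITION & SPEC =====

def Spec_get_all_path_nodes_with_group_filter (intersection_nodes : List String) (tree_parent_dict : List (String × String)) (mutation_group : List (String × String)) (target_group : String) (out : List String) : Prop := out = get_all_path_nodes_with_group_filter_alt intersection_nodes tree_parent_dict mutation_group target_group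
instance (intersection_nodes : List String) (tree_parent_dict : List (String × String)) (mutation_group : List (String × String)) (target_group : String) (out : List String) : Decidable (Spec_get_all_path_nodes_with_group_filter intersection_nodes tree_parent_dict mutation_group target_group out) := by unfold Spec_get_all_path_nodes_with_group_filter; infer_instance

-- ===== CLAIM (what is proved, stated in full; the proofs are below) =====
def Claim_equal_get_all_path_nodes_with_group_filter : Prop := ∀ (intersection_nodes : List String) (tree_parent_dict : List (String × String)) (mutation_group : List (String × String)) (target_group : String), Dom_get_all_path_nodes_with_group_filter intersection_nodes tree_parent_dict mutation_group target_group → Spec_get_all_path_nodes_with_group_filter intersection_nodes tree_parent_dict mutation_group target_group (get_all_path_nodes_with_group_filter intersection_nodes tree_parent_dict mutation_group target_group)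

-- ===== LEMMAS AND PROOFS =====

theorem pvWalkA_acc (d : PySem.Dict String String) (fuel : Nat) :
    ∀ (cur : String) (path : List String), pvWalkA d fuel cur path = path ++ pvWalkA d fuel cur [] := by
  induction fuel with
  | zero => intro cur path; simp [pvWalkA]
  | succ f ih =>
    intro cur path
    simp only [pvWalkA]
    split_ifs with h1 h2
    · simp
    · rw [ih (d.getD cur "") (path ++ [cur]), ih (d.getD cur "") ([] ++ [cur])]
      simp
    · simp

theorem pvWalkB_eq_update (d : PySem.Dict String String) (fuel : Nat) :
    ∀ (cur : String) (s : PySem.Set String), "ROOT" ∈ s →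
      pvWalkB d fuel cur s = PySem.Set.update s (pvWalkA d fuel cur []) := by
  induction fuel with
  | zero => intro cur s _; simp [pvWalkA, pvWalkB, PySem.Set.update_nil]
  | succ f ih =>
    intro cur s hR
    simp only [pvWalkA, pvWalkB]
    cases hg : d.get? cur with
    | none =>
      have hc : d.contains cur = false := by
        rw [PySem.Dict.contains_eq_isSome_get?, hg]; rfl
      simp [hc, PySem.Set.update_nil]
    | some nxt =>
      have hc : d.contains cur = true := by
        rw [PySem.Dict.contains_eq_isSome_get?, hg]; rfl
      have hgd : d.getD cur "" = nxt := by
        rw [PySem.Dict.getD_eq_get?_getD, hg]; rfl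
      simp only [hc, if_true, hgd]
      by_cases h2 : nxt = "ROOT"
      · subst h2
        simp only [beq_self_eq_true, if_true]
        rw [show ([] ++ [cur] : List String) ++ ["ROOT"] = cur :: ["ROOT"] by rfl]
        rw [PySem.Set.update_cons, PySem.Set.update_cons, PySem.Set.update_nil]
        rw [PySem.Set.add_of_mem (PySem.Set.mem_add s cur "ROOT" |>.mpr (Or.inl hR))]
      · simp only [beq_iff_eq, h2, if_false]
        rw [ih nxt (PySem.Set.add s cur) (PySem.Set.mem_add s cur "ROOT" |>.mpr (Or.inl hR))]
        rw [pvWalkA_acc d f nxt ([] ++ [cur])]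
        rw [show ([] ++ [cur] : List String) = [cur] by rfl]
        rw [show ([cur] ++ pvWalkA d f nxt [] : List String) = cur :: pvWalkA d f nxt [] by rfl]
        rw [PySem.Set.update_cons]

theorem pvUpdate_of_subset {s : PySem.Set String} {l : List String} (h : ∀ x ∈ l, x ∈ s) :
    PySem.Set.update s l = s := by
  induction l generalizing s with
  | nil => exact PySem.Set.update_nil s
  | cons x xs ih =>
    rw [PySem.Set.update_cons, PySem.Set.add_of_mem (h x (by simp)), ih]
    intro y hy; exact h y (by simp [hy])

theorem pvMem_slice_from {l : List String} {a : Int} (ha : 0 ≤ a) :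
    ∀ x ∈ PySem.List.slice l (some a) none, x ∈ l := by
  intro x hx
  rw [PySem.List.slice_from l ha] at hx
  exact List.mem_of_mem_drop hx

theorem pvPathBetween_subset (n1 n2 : String) (d : PySem.Dict String String) :
    ∀ x ∈ pvGetPathBetween n1 n2 d, x ∈ pvGetPathToRoot n1 d ∨ x ∈ pvGetPathToRoot n2 d := by
  intro x hx
  unfold pvGetPathBetween at hx
  simp only [] at hx
  split at hx
  · simp at hx
  · rw [List.mem_append] at hx
    rcases hx with hx | hx
    · left
      rw [← List.mem_reverse]
      exact pvMem_slice_from (by positivity) x hx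
    · right
      rw [← List.mem_reverse]
      exact pvMem_slice_from (by positivity) x
        (pvMem_slice_from (by norm_num) x hx)

theorem pvValidLoopA_eq_any (muts : List String) (mg : PySem.Dict String String) (tg : String) :
    pvValidLoopA muts mg tg = muts.any (fun m => mg.get? m == some tg) := by
  induction muts with
  | nil => rfl
  | cons m rest ih =>
    simp only [pvValidLoopA, List.any_cons, ← ih]
    have : (mg.contains m && (mg.getD m "" == tg)) = (mg.get? m == some tg) := by
      rw [PySem.Dict.contains_eq_isSome_get?, PySem.Dict.getD_eq_get?_getD]
      cases hg : mg.get? m with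
      | none => simp
      | some v => simp [Option.getD]
    rw [this]
    cases h : (mg.get? m == some tg) <;> simp

theorem pvFoldl_fixpoint {α β : Type} (g : β → α → β) (S : β) (L : List α)
    (h : ∀ i ∈ L, g S i = S) : L.foldl g S = S := by
  induction L with
  | nil => rfl
  | cons x xs ih =>
    rw [List.foldl_cons, h x (by simp), ih]
    intro i hi; exact h i (by simp [hi])

theorem pvMem_foldl_update {ins : List String} (f : String → List String) :
    ∀ (s : PySem.Set String) (x : String), x ∈ s →
      x ∈ ins.foldl (fun s n => PySem.Set.update s (f n)) s := by
  induction ins with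
  | nil => intro s x hx; exact hx
  | cons n rest ih =>
    intro s x hx
    exact ih _ x ((PySem.Set.mem_update s (f n) x).mpr (Or.inl hx))

theorem pvPath_mem_foldl {ins : List String} (f : String → List String) :
    ∀ (s : PySem.Set String) (n : String), n ∈ ins → ∀ x ∈ f n,
      x ∈ ins.foldl (fun s n => PySem.Set.update s (f n)) s := by
  induction ins with
  | nil => intro _ _ h; simp at h
  | cons m rest ih =>
    intro s n hn x hx
    rw [List.foldl_cons]
    rcases List.mem_cons.mp hn with h | h
    · subst h
      exact pvMem_foldl_update f _ x ((PySem.Set.mem_update s (f n) x).mpr (Or.inr hx))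
    · exact ih _ n h x hx

theorem pvFoldB_eq_foldA (d : PySem.Dict String String) (ins : List String) :
    ∀ (s : PySem.Set String), "ROOT" ∈ s →
      ins.foldl (fun s n => pvWalkB d (d.size + 1) n s) s
        = ins.foldl (fun s n => PySem.Set.update s (pvGetPathToRoot n d)) s := by
  induction ins with
  | nil => intro s _; rfl
  | cons n rest ih =>
    intro s hR
    rw [List.foldl_cons, List.foldl_cons, pvWalkB_eq_update d (d.size + 1) n s hR]
    exact ih _ ((PySem.Set.mem_update s _ "ROOT").mpr (Or.inl hR))

theorem pvValid_eq (node : String) (mg : PySem.Dict String String) (tg : String) :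
    pvValidNodeWithGroup node mg tg = pvValidB node mg tg := by
  unfold pvValidNodeWithGroup pvValidB
  exact pvValidLoopA_eq_any _ mg tg

theorem main_eq (ins : List String) (tpd mgl : List (String × String)) (tg : String) :
    (let d := PySem.Dict.mk tpd
     let mg := PySem.Dict.mk mgl
     let s0 : PySem.Set String := PySem.Set.add PySem.Set.empty "ROOT"
     let s1 := ins.foldl (fun s node => PySem.Set.update s (pvGetPathToRoot node d)) s0
     let s2 := (PySem.List.pyRange 0 ins.length).foldl (fun s i =>
        (PySem.List.pyRange (i+1) ins.length).foldl (fun s j =>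
          PySem.Set.update s (pvGetPathBetween (PySem.List.pyGetD ins i "")
            (PySem.List.pyGetD ins j "") d)) s) s1
     PySem.Set.ofList (s2.filter (fun node => pvValidNodeWithGroup node mg tg)))
    = (let d := PySem.Dict.mk tpd
       let mg := PySem.Dict.mk mgl
       let seen := ins.foldl (fun s n => pvWalkB d (d.size + 1) n s) (PySem.Set.ofList ["ROOT"])
       PySem.Set.ofList (seen.filter (fun n => pvValidB n mg tg))) := by
  simp only []
  set d := PySem.Dict.mk tpd
  have hs0 : (PySem.Set.add PySem.Set.empty "ROOT") = PySem.Set.ofList ["ROOT"] := rfl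
  have hR : "ROOT" ∈ PySem.Set.ofList ["ROOT"] := by decide
  rw [pvFoldB_eq_foldA d ins _ hR, ← hs0]
  set s1 := ins.foldl (fun s node => PySem.Set.update s (pvGetPathToRoot node d))
      (PySem.Set.add PySem.Set.empty "ROOT") with hs1
  have hmem : ∀ n ∈ ins, ∀ x ∈ pvGetPathToRoot n d, x ∈ s1 := by
    intro n hn x hx
    exact pvPath_mem_foldl _ _ n hn x hx
  have h2 : (PySem.List.pyRange 0 ins.length).foldl (fun s i =>
        (PySem.List.pyRange (i+1) ins.length).foldl (fun s j =>
          PySem.Set.update s (pvGetPathBetween (PySem.List.pyGetD ins i "")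
            (PySem.List.pyGetD ins j "") d)) s) s1 = s1 := by
    apply pvFoldl_fixpoint
    intro i hi
    rcases PySem.List.mem_pyRange_one.mp hi with ⟨hi0, hilt⟩
    apply pvFoldl_fixpoint
    intro j hj
    rcases PySem.List.mem_pyRange_one.mp hj with ⟨hj0, hjlt⟩
    apply pvUpdate_of_subset
    intro x hx
    have hiel : PySem.List.pyGetD ins i "" ∈ ins := by
      rw [PySem.List.pyGetD_eq_getElem ins "" hi0 hilt]
      exact List.getElem_mem _
    have hjel : PySem.List.pyGetD ins j "" ∈ ins := by
      rw [PySem.List.pyGetD_eq_getElem ins "" (by omega) hjlt]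
      exact List.getElem_mem _
    rcases pvPathBetween_subset _ _ d x hx with h | h
    · exact hmem _ hiel x h
    · exact hmem _ hjel x h
  rw [h2]
  congr 1
  apply List.filter_congr
  intro x _
  exact pvValid_eq x (PySem.Dict.mk mgl) tg

-- ===== VERDICT (by name: the statement is the Claim_ definition above) =====
theorem get_all_path_nodes_with_group_filter_spec : Claim_equal_get_all_path_nodes_with_group_filter := by
  intro ins tpd mgl tg _dom
  exact main_eq ins tpd mgl tg
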